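-- pv_equiv track=rewrite | github.com/wangyuanchuan2022/auto_select_course | utils.py | blue
-- ===== SOURCE A (Python) =====
-- def blue(text, _input=False):
--     faded = ""
--     for line in text.splitlines():
--         red = 44
--         green = 180
--         for character in line:
--             green += 2
--             red += 5
--             if green > 255:
--                 green = 255
--             if red > 173:
--                 red = 173
--             faded += f"\033[38;2;{red};{green};255m{character}\033[0m"
--         if _input:
--             faded += f"\033[38;2;{red};{green};255m"
--     return faded
-- ===== SOURCE B (Python) =====
-- def blue(text, _input=False):
--     lines = text.splitlines()
--     m = 0
--     for line in lines:
--         m = max(m, len(line))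
--     # colour-escape table built once and shared by every line: the colour of a
--     # character depends only on its index, saturating at min(173,49+5i)/min(255,182+2i)
--     opens = ["\033[38;2;{};{};255m".format(min(173, 49 + 5 * i), min(255, 182 + 2 * i))
--              for i in range(m)]
--     out = []
--     for line in lines:
--         out.extend(o + c + "\033[0m" for o, c in zip(opens, line))
--         if _input:
--             out.append(opens[len(line) - 1] if line else "\033[38;2;44;180;255m")
--     return "".join(out)
-- ===== Notes on version B (the rewrite author's own statement) =====
-- stated objective: alternative
-- what changed: Instead of recomputing running red/green accumulators per character per line, B precomputes a single table of colour-escape prefixes indexed by character position (shared across all lines, sized by the longest line) and renders each line by zipping it with that table; the _input suffix is a table lookup; pieces are collected in a list and joined once.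
import Mathlib
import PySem

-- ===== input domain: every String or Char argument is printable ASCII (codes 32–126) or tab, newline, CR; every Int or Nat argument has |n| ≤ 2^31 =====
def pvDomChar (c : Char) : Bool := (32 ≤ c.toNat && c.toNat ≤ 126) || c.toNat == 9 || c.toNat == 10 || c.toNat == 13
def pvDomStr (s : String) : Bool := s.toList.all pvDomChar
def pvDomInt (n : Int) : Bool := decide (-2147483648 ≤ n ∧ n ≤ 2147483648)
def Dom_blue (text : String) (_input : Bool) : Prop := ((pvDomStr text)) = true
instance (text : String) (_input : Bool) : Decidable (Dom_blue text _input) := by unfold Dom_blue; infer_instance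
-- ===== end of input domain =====

-- B replaces A's running red/green accumulators by a colour-escape table precomputed
-- once from the longest line and shared across all lines via zip, joined at the end
-- (objective: alternative decomposition; same asymptotic cost).

-- ===== PORT A =====
-- one step of A's inner character loop; state = (faded, red, green)
def blueStep (st : String × Int × Int) (character : Char) : String × Int × Int :=
  let green := st.2.2 + 2
  let red := st.2.1 + 5
  let green := if green > 255 then 255 else green
  let red := if red > 173 then 173 else red
  (st.1 ++ "\x1b[38;2;" ++ PySem.Int.toStr red ++ ";" ++ PySem.Int.toStr green ++ ";255m"
        ++ String.singleton character ++ "\x1b[0m", red, green)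

def blue (text : String) (_input : Bool) : String :=
  (PySem.Str.splitlines text).foldl (fun faded line =>
    let st := line.toList.foldl blueStep (faded, 44, 180)
    if _input then
      st.1 ++ "\x1b[38;2;" ++ PySem.Int.toStr st.2.1 ++ ";" ++ PySem.Int.toStr st.2.2 ++ ";255m"
    else st.1) ""

-- ===== PORT B =====
-- "\033[38;2;{r};{g};255m"
def blueOpen (r g : Int) : String :=
  "\x1b[38;2;" ++ PySem.Int.toStr r ++ ";" ++ PySem.Int.toStr g ++ ";255m"

def blue_alt (text : String) (_input : Bool) : String :=
  let lines := PySem.Str.splitlines text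
  let m : Int := lines.foldl (fun m line => max m ((line.toList.length : Int))) 0
  let opens := (PySem.List.pyRange 0 m 1).map (fun i =>
      blueOpen (min 173 (49 + 5 * i)) (min 255 (182 + 2 * i)))
  let out := lines.foldl (fun out line =>
    let out := out ++ (List.zip opens line.toList).map
        (fun p => p.1 ++ String.singleton p.2 ++ "\x1b[0m")
    if _input then
      out ++ [if line.toList.length = 0 then blueOpen 44 180
              -- opens[len(line)-1]: the index is always in range (1 ≤ len ≤ m), so pyGetD is exact
              else PySem.List.pyGetD opens ((line.toList.length : Int) - 1) ""]
    else out) []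
  PySem.Str.join "" out

-- ===== PRECONDITION & SPEC =====
def Spec_blue (text : String) (_input : Bool) (out : String) : Prop := out = blue_alt text _input
instance (text : String) (_input : Bool) (out : String) : Decidable (Spec_blue text _input out) := by unfold Spec_blue; infer_instance

-- ===== CLAIM (what is proved, stated in full; the proofs are below) =====
def Claim_equal_blue : Prop := ∀ (text : String) (_input : Bool), Dom_blue text _input → Spec_blue text _input (blue text _input)

-- ===== LEMMAS AND PROOFS =====

theorem push_append (a b : String) (c : Char) : (a ++ b).push c = a ++ b.push c := by
  rw [← String.append_singleton, ← String.append_singleton, String.append_assoc]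

theorem join_empty_nil : PySem.Str.join "" [] = "" := by decide

theorem join_empty_cons (x : String) (xs : List String) :
    PySem.Str.join "" (x :: xs) = x ++ PySem.Str.join "" xs := by
  cases xs with
  | nil =>
      apply String.toList_inj.mp
      simp [PySem.Chars.join_singleton, PySem.Chars.join_nil]
  | cons y ys =>
      apply String.toList_inj.mp
      simp [PySem.Chars.join_cons_cons]

theorem join_empty_append (xs ys : List String) :
    PySem.Str.join "" (xs ++ ys) = PySem.Str.join "" xs ++ PySem.Str.join "" ys := by
  induction xs with
  | nil => simp [join_empty_nil]
  | cons x xs ih => simp [join_empty_cons, ih, String.append_assoc]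

-- A's inner piece "\033[38;2;{r};{g};255m{ch}\033[0m" is blueOpen r g followed by ch and reset
def bluePiece (r g : Int) (ch : Char) : String :=
  "\x1b[38;2;" ++ PySem.Int.toStr r ++ ";" ++ PySem.Int.toStr g ++ ";255m"
    ++ String.singleton ch ++ "\x1b[0m"

-- closed form of A's inner loop, for a start state after k characters
theorem blue_inner (cs : List Char) (acc : String) (k : Int) :
    cs.foldl blueStep (acc, min 173 (44 + 5 * k), min 255 (180 + 2 * k)) =
    (acc ++ PySem.Str.join "" ((PySem.List.enumerate cs k).map (fun p =>
        bluePiece (min 173 (49 + 5 * p.1)) (min 255 (182 + 2 * p.1)) p.2)),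
     min 173 (44 + 5 * (k + cs.length)), min 255 (180 + 2 * (k + cs.length))) := by
  induction cs generalizing acc k with
  | nil => simp [join_empty_nil]
  | cons c cs ih =>
      have hr : (if min 173 (44 + 5 * k) + 5 > 173 then (173:Int) else min 173 (44 + 5 * k) + 5)
          = min 173 (49 + 5 * k) := by omega
      have hg : (if min 255 (180 + 2 * k) + 2 > 255 then (255:Int) else min 255 (180 + 2 * k) + 2)
          = min 255 (182 + 2 * k) := by omega
      have h49 : min (173:Int) (49 + 5 * k) = min 173 (44 + 5 * (k + 1)) := by omega
      have h182 : min (255:Int) (182 + 2 * k) = min 255 (180 + 2 * (k + 1)) := by omega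
      simp only [List.foldl_cons, blueStep, hr, hg, PySem.List.enumerate_cons, List.map_cons,
        join_empty_cons]
      rw [h49, h182, ih]
      simp only [bluePiece, List.length_cons]
      push_cast
      rw [show k + 1 + (cs.length:Int) = k + ((cs.length:Int) + 1) by ring]
      simp [String.append_assoc, push_append]

-- zipping a mapped integer range with a list is a map over enumerate
theorem zip_map_pyRange {α β : Type} (g : Int → β) (cs : List α) (a b : Int)
    (h : (cs.length : Int) ≤ b - a) :
    List.zip ((PySem.List.pyRange a b 1).map g) cs =
    (PySem.List.enumerate cs a).map (fun p => (g p.1, p.2)) := by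
  induction cs generalizing a with
  | nil => simp
  | cons c cs ih =>
      have hab : a < b := by simp at h; omega
      rw [PySem.List.pyRange_one_cons hab]
      simp only [List.map_cons, List.zip_cons_cons, PySem.List.enumerate_cons]
      rw [ih (a + 1) (by simp at h ⊢; omega)]

-- B's rendering of one line equals the enumerate form A's inner loop produces
theorem zip_opens (cs : List Char) (m : Int) (h : (cs.length : Int) ≤ m) :
    (List.zip ((PySem.List.pyRange 0 m 1).map (fun i =>
        blueOpen (min 173 (49 + 5 * i)) (min 255 (182 + 2 * i)))) cs).map
      (fun p => p.1 ++ String.singleton p.2 ++ "\x1b[0m") =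
    (PySem.List.enumerate cs 0).map (fun p =>
        bluePiece (min 173 (49 + 5 * p.1)) (min 255 (182 + 2 * p.1)) p.2) := by
  rw [zip_map_pyRange _ cs 0 m (by omega)]
  simp [bluePiece, blueOpen, String.append_assoc]

theorem blue_fold (lines : List String) (_input : Bool) (m : Int)
    (hm : ∀ l ∈ lines, (l.toList.length : Int) ≤ m) (pacc : List String) :
    lines.foldl (fun faded line =>
      let st := line.toList.foldl blueStep (faded, 44, 180)
      if _input then
        st.1 ++ "\x1b[38;2;" ++ PySem.Int.toStr st.2.1 ++ ";" ++ PySem.Int.toStr st.2.2 ++ ";255m"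
      else st.1) (PySem.Str.join "" pacc) =
    PySem.Str.join "" (lines.foldl (fun out line =>
      let out := out ++ (List.zip ((PySem.List.pyRange 0 m 1).map (fun i =>
          blueOpen (min 173 (49 + 5 * i)) (min 255 (182 + 2 * i)))) line.toList).map
          (fun p => p.1 ++ String.singleton p.2 ++ "\x1b[0m")
      if _input then
        out ++ [if line.toList.length = 0 then blueOpen 44 180
                else PySem.List.pyGetD ((PySem.List.pyRange 0 m 1).map (fun i =>
                    blueOpen (min 173 (49 + 5 * i)) (min 255 (182 + 2 * i))))
                  ((line.toList.length : Int) - 1) ""]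
      else out) pacc) := by
  induction lines generalizing pacc with
  | nil => rfl
  | cons line lines ih =>
      have hline := hm line (List.mem_cons_self ..)
      have hin := blue_inner line.toList (PySem.Str.join "" pacc) 0
      norm_num at hin
      have hz := zip_opens line.toList m hline
      cases _input with
      | false =>
          simp only [List.foldl_cons, Bool.false_eq_true, if_false, hin, hz,
            ← join_empty_append]
          exact ih (fun l hl => hm l (List.mem_cons_of_mem _ hl)) _
      | true =>
          simp only [List.foldl_cons, if_true, hin, hz, String.length_toList]
          rw [String.length_toList] at hline
          by_cases hl : line.length = 0
          · rw [if_pos hl]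
            have h1 : min (173:Int) (44 + 5 * (line.length : Int)) = 44 := by omega
            have h2 : min (255:Int) (180 + 2 * (line.length : Int)) = 180 := by omega
            rw [h1, h2]
            refine Eq.trans ?_ (ih (fun l hl => hm l (List.mem_cons_of_mem _ hl)) _)
            congr 1
            simp [join_empty_append, join_empty_cons, join_empty_nil, blueOpen,
              String.append_assoc]
          · rw [if_neg hl]
            have hget := PySem.List.pyGetD_map_pyRange_of_nonneg
              (fun i => blueOpen (min 173 (49 + 5 * i)) (min 255 (182 + 2 * i))) m
              ((line.length : Int) - 1) "" (by omega) (by omega)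
            have h1 : min (173:Int) (44 + 5 * (line.length : Int)) =
                min 173 (49 + 5 * ((line.length : Int) - 1)) := by omega
            have h2 : min (255:Int) (180 + 2 * (line.length : Int)) =
                min 255 (182 + 2 * ((line.length : Int) - 1)) := by omega
            rw [h1, h2]
            refine Eq.trans ?_ (ih (fun l hl => hm l (List.mem_cons_of_mem _ hl)) _)
            congr 1
            rw [hget]
            simp [join_empty_append, join_empty_cons, join_empty_nil, blueOpen,
              String.append_assoc]

-- ===== VERDICT (by name: the statement is the Claim_ definition above) =====
theorem blue_spec : Claim_equal_blue := by
  intro text _input _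
  unfold Spec_blue blue blue_alt
  have hm := (PySem.List.le_foldl_max_int (PySem.Str.splitlines text)
      (fun line => ((line.toList.length : Int))) 0).2
  have h := blue_fold (PySem.Str.splitlines text) _input _ hm []
  simpa [join_empty_nil] using h
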